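-- pv_equiv track=rewrite | github.com/jeevanm27/high-performance-computing | data-processing/verify_splits.py | check_no_duplicates
-- ===== SOURCE A (Python) =====
-- def check_no_duplicates(edges):
--     seen = set()
--     dup = 0
--     for e in edges:
--         if e in seen:
--             dup += 1
--         else:
--             seen.add(e)
--     return dup == 0, dup
-- ===== SOURCE B (Python) =====
-- def check_no_duplicates(edges):
--     s = sorted(edges)
--     dup = sum(1 for a, b in zip(s, s[1:]) if a == b)
--     return dup == 0, dup
-- ===== Notes on version B (the rewrite author's own statement) =====
-- stated objective: alternative
-- what changed: Replaces the hash-set membership loop with sort-then-scan: sort the edges, then count adjacent equal pairs, which equals the number of duplicate occurrences.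
import Mathlib
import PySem

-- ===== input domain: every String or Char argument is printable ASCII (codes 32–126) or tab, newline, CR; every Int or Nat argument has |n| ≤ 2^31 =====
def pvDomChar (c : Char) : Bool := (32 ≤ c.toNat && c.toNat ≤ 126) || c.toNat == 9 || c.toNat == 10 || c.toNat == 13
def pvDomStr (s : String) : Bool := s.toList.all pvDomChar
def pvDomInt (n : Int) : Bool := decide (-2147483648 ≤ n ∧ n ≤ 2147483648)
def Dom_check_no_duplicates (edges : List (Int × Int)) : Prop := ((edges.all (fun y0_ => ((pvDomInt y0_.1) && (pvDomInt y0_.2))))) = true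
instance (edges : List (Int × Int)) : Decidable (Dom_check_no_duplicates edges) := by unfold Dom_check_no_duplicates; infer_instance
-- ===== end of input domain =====

-- B sorts the edges and counts adjacent equal pairs instead of A's hash-set membership loop; return-value equivalence, same (bool, int) pair.


-- ===== PORT A =====
def check_no_duplicates (edges : List (Int × Int)) : Bool × Int :=
  let r := edges.foldl
    (fun (st : PySem.Set (Int × Int) × Int) e =>
      if PySem.Set.contains st.1 e then (st.1, st.2 + 1) else (PySem.Set.add st.1 e, st.2))
    (PySem.Set.empty, 0)
  (r.2 == 0, r.2)

-- ===== PORT B =====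
-- sorted(edges) compares (Int × Int) lexicographically, i.e. by the linear order on Int ×ₗ Int;
-- s[1:] is s.drop 1 (exact: the start index 1 is nonnegative); the 0/1-sum is countP.
def check_no_duplicates_alt (edges : List (Int × Int)) : Bool × Int :=
  let s := PySem.List.sorted edges (fun p => toLex p) false
  let dup : Int := ((s.zip (s.drop 1)).countP (fun p => p.1 == p.2) : Nat)
  (dup == 0, dup)

-- ===== PRECONDITION & SPEC =====
def Spec_check_no_duplicates (edges : List (Int × Int)) (out : Bool × Int) : Prop := out = check_no_duplicates_alt edges
instance (edges : List (Int × Int)) (out : Bool × Int) : Decidable (Spec_check_no_duplicates edges out) := by unfold Spec_check_no_duplicates; infer_instance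

-- ===== CLAIM (what is proved, stated in full; the proofs are below) =====
def Claim_equal_check_no_duplicates : Prop := ∀ (edges : List (Int × Int)), Dom_check_no_duplicates edges → Spec_check_no_duplicates edges (check_no_duplicates edges)

-- ===== LEMMAS AND PROOFS =====

-- A's loop computes dup = |edges| - |set(edges)|.
lemma loopA (edges : List (Int × Int)) (s : PySem.Set (Int × Int)) (d : Int) :
    edges.foldl
      (fun (st : PySem.Set (Int × Int) × Int) e =>
        if PySem.Set.contains st.1 e then (st.1, st.2 + 1) else (PySem.Set.add st.1 e, st.2))
      (s, d)
    = (PySem.Set.update s edges,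
       d + edges.length - (PySem.Set.update s edges).length + s.length) := by
  induction edges generalizing s d with
  | nil =>
    simp only [List.foldl_nil, PySem.Set.update_nil]
    refine Prod.ext rfl ?_
    simp
  | cons e rest ih =>
    simp only [List.foldl_cons, PySem.Set.update_cons]
    by_cases h : e ∈ s
    · have hc : PySem.Set.contains s e = true := by simp [h]
      have hadd : PySem.Set.add s e = s := PySem.Set.add_of_mem h
      rw [hc, if_pos rfl, ih, hadd]
      refine Prod.ext rfl ?_
      simp only [List.length_cons]
      push_cast; ring
    · have hc : PySem.Set.contains s e = false := by simp [h]
      have hadd : PySem.Set.add s e = s ++ [e] := PySem.Set.add_of_not_mem h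
      rw [hc, if_neg (by simp), ih]
      refine Prod.ext rfl ?_
      simp only [List.length_cons, hadd, List.length_append, List.length_nil]
      push_cast; ring

-- |set(xs)| is the number of distinct elements.
lemma ofList_length_eq_card (xs : List (Int × Int)) :
    (PySem.Set.ofList xs).length = xs.toFinset.card := by
  have hnd : (PySem.Set.ofList xs).Nodup := PySem.Set.nodup_ofList xs
  have hfs : (PySem.Set.ofList xs).toFinset = xs.toFinset := by
    ext a; simp [PySem.Set.mem_ofList]
  rw [← List.toFinset_card_of_nodup hnd, hfs]

-- In a lexicographically sorted list, adjacent-equal pairs + distinct elements = length.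
lemma adj_count (s : List (Int × Int))
    (h : s.Pairwise (fun a b => toLex a ≤ toLex b)) :
    (s.zip (s.drop 1)).countP (fun p => p.1 == p.2) + s.toFinset.card = s.length := by
  induction s with
  | nil => simp
  | cons a t ih =>
    cases t with
    | nil => simp
    | cons b t' =>
      rw [List.pairwise_cons] at h
      obtain ⟨ha, htail⟩ := h
      have ih' := ih htail
      rw [List.pairwise_cons] at htail
      simp only [List.drop_succ_cons, List.drop_zero, List.zip_cons_cons,
        List.countP_cons, List.length_cons, List.toFinset_cons] at *
      by_cases hab : a = b
      · have hmem : a ∈ insert b t'.toFinset := by simp [hab]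
        rw [Finset.insert_eq_self.mpr hmem]
        simp only [hab, beq_self_eq_true, if_pos]
        omega
      · have hnot : a ∉ insert b t'.toFinset := by
          simp only [Finset.mem_insert, List.mem_toFinset]
          rintro (rfl | hx)
          · exact hab rfl
          · have h1 : toLex a ≤ toLex b := ha b (by simp)
            have h2 : toLex b ≤ toLex a := htail.1 a hx
            exact hab (toLex_inj.mp (le_antisymm h1 h2) ▸ rfl)
        rw [Finset.card_insert_of_notMem hnot]
        have hne : (a == b) = false := by simp [hab]
        simp only [hne, Bool.false_eq_true, if_false]
        omega

theorem check_no_duplicates_spec : Claim_equal_check_no_duplicates := by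
  intro edges _
  unfold Spec_check_no_duplicates check_no_duplicates check_no_duplicates_alt
  have hA := loopA edges PySem.Set.empty 0
  simp only [hA]
  set s := PySem.List.sorted edges (fun p => toLex p) false with hs
  have hperm : s.Perm edges := PySem.List.sorted_perm edges _ false
  have hlen : s.length = edges.length := hperm.length_eq
  have hfs : s.toFinset = edges.toFinset := by
    ext x; simp [List.mem_toFinset, hperm.mem_iff]
  have hsorted : s.Pairwise (fun a b => toLex a ≤ toLex b) :=
    PySem.List.sorted_pairwise edges (fun p => toLex p)
  have hadj := adj_count s hsorted
  rw [show PySem.Set.update PySem.Set.empty edges = PySem.Set.ofList edges from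
    PySem.Set.update_nil_left edges]
  have hcard := ofList_length_eq_card edges
  have hdup : ((0 : Int) + edges.length - (PySem.Set.ofList edges).length
      + (PySem.Set.empty : PySem.Set (Int × Int)).length)
      = (((s.zip (s.drop 1)).countP (fun p => p.1 == p.2) : Nat) : Int) := by
    simp only [PySem.Set.empty, List.length_nil, Nat.cast_zero, add_zero, zero_add, hcard]
    rw [hfs] at hadj
    omega
  refine Prod.ext ?_ ?_
  · simp only [hdup]
  · simp only [hdup]
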